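-- pv_equiv track=rewrite | github.com/mingjiaojiaozhu/Euler | project_euler/Problem037/Problem037.py | __check_digits
-- ===== SOURCE A (Python) =====
-- def __check_digits(value: int) -> bool:
--     remainder = value % 10
--     if 3 != remainder and 7 != remainder:
--         return False
--
--     value //= 10
--     while value >= 10:
--         remainder = value % 10
--         if 1 != remainder and 3 != remainder and 7 != remainder and 9 != remainder:
--             return False
--         value //= 10
--     return 2 == value or 3 == value or 5 == value or 7 == value
-- ===== SOURCE B (Python) =====
-- def __check_digits(value: int) -> bool:
--     if value < 10:
--         return False
--     digits = []
--     v = value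
--     while v:
--         digits.append(v % 10)
--         v //= 10
--     return (digits[0] in (3, 7)
--             and all(d in (1, 3, 7, 9) for d in digits[1:-1])
--             and digits[-1] in (2, 3, 5, 7))
-- ===== Notes on version B (the rewrite author's own statement) =====
-- stated objective: idiomatic
-- what changed: B rejects sub-two-digit and negative inputs up front, extracts the digit list once, and states the three truncatable-digit conditions declaratively over digits[0], digits[1:-1] and digits[-1], replacing A's fused modular while-loop with early returns.
import Mathlib
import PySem

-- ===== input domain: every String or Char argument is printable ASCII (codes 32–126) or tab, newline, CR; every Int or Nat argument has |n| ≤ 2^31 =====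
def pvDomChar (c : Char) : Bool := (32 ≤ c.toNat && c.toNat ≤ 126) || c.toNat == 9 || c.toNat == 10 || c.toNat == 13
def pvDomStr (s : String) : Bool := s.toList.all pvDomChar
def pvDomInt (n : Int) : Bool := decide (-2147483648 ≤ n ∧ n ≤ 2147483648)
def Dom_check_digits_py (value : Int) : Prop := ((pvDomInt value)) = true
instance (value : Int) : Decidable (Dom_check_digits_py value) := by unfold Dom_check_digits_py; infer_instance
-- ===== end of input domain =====

-- B builds the digit list once and states the three membership checks declaratively
-- instead of A's fused modular loop with early returns (objective: simpler/idiomatic).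

-- ===== PORT A =====
-- the 'while value >= 10' loop of A
def check_digits_py_loop (value : Int) : Bool :=
  if _h : 10 ≤ value then
    let remainder := PySem.Int.mod value 10
    if 1 ≠ remainder ∧ 3 ≠ remainder ∧ 7 ≠ remainder ∧ 9 ≠ remainder then false
    else check_digits_py_loop (PySem.Int.floordiv value 10)
  else (value == 2 || value == 3 || value == 5 || value == 7)
termination_by value.toNat
decreasing_by
  have := PySem.Int.floordiv_eq_ediv_of_pos (a := value) (b := 10) (by omega)
  omega

def check_digits_py (value : Int) : Bool :=
  let remainder := PySem.Int.mod value 10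
  if 3 ≠ remainder ∧ 7 ≠ remainder then false
  else check_digits_py_loop (PySem.Int.floordiv value 10)

-- ===== PORT B =====
-- the 'while v:' digit-collecting loop of B; B only runs it for v ≥ 10 (for
-- negative v the Python loop would not terminate, hence the 0 < v guard is exact there)
def pvDigits (v : Int) : List Int :=
  if _h : 0 < v then PySem.Int.mod v 10 :: pvDigits (PySem.Int.floordiv v 10) else []
termination_by v.toNat
decreasing_by
  have := PySem.Int.floordiv_eq_ediv_of_pos (a := v) (b := 10) (by omega)
  omega

def check_digits_py_alt (value : Int) : Bool :=
  if value < 10 then false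
  else
    let digits := pvDigits value
    match PySem.List.pyGet? digits 0, PySem.List.pyGet? digits (-1) with
    | some d0, some dl =>
        (d0 == 3 || d0 == 7) &&
        (PySem.List.slice digits (some 1) (some (-1))).all
          (fun d => d == 1 || d == 3 || d == 7 || d == 9) &&
        (dl == 2 || dl == 3 || dl == 5 || dl == 7)
    | _, _ => false  -- IndexError; unreachable since digits ≠ [] when value ≥ 10

-- ===== PRECONDITION & SPEC =====
def Spec_check_digits_py (value : Int) (out : Bool) : Prop := out = check_digits_py_alt value
instance (value : Int) (out : Bool) : Decidable (Spec_check_digits_py value out) := by unfold Spec_check_digits_py; infer_instance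

-- ===== CLAIM (what is proved, stated in full; the proofs are below) =====
def Claim_equal_check_digits_py : Prop := ∀ (value : Int), Dom_check_digits_py value → Spec_check_digits_py value (check_digits_py value)

-- ===== LEMMAS AND PROOFS =====

theorem pvDigits_ne_nil (v : Int) (h : 0 < v) : pvDigits v ≠ [] := by
  rw [pvDigits]; simp [h]

theorem slice_one_neg_one (xs : List Int) :
    PySem.List.slice xs (some 1) (some (-1)) = xs.tail.dropLast := by
  simp [PySem.List.slice]
  cases xs with
  | nil => simp
  | cons x t => simp [List.dropLast_eq_take]

theorem pyGet?_neg_one (xs : List Int) (h : xs ≠ []) :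
    PySem.List.pyGet? xs (-1) = some (xs.getLastD 0) := by
  simp [PySem.List.pyGet?, PySem.List.pyIdx?]
  have hl : 1 ≤ xs.length := List.length_pos_iff.mpr h
  simp [hl, List.getLast?_eq_getElem?, List.getElem?_eq_getElem (by omega : xs.length - 1 < xs.length)]

theorem pyGet?_zero (x : Int) (xs : List Int) :
    PySem.List.pyGet? (x :: xs) 0 = some x := by
  simp [PySem.List.pyGet?, PySem.List.pyIdx?]

theorem loop_char (v : Int) (h : 1 ≤ v) :
    check_digits_py_loop v =
      ((pvDigits v).dropLast.all (fun d => d == 1 || d == 3 || d == 7 || d == 9) &&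
       ((pvDigits v).getLastD 0 == 2 || (pvDigits v).getLastD 0 == 3 ||
        (pvDigits v).getLastD 0 == 5 || (pvDigits v).getLastD 0 == 7)) := by
  have hv : (0:Int) < v := by omega
  have hm : PySem.Int.mod v 10 = v % 10 := PySem.Int.mod_eq_emod_of_pos (by omega)
  have hd : PySem.Int.floordiv v 10 = v / 10 := PySem.Int.floordiv_eq_ediv_of_pos (by omega)
  rw [check_digits_py_loop, pvDigits, dif_pos hv]
  by_cases h10 : 10 ≤ v
  · have h1 : 1 ≤ v / 10 := by omega
    have hne := pvDigits_ne_nil (v / 10) (by omega)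
    obtain ⟨x, hE⟩ : ∃ x, (pvDigits (v / 10)).getLast? = some x :=
      Option.isSome_iff_exists.mp (List.getLast?_isSome.mpr hne)
    rw [dif_pos h10]
    have IH := loop_char (v / 10) h1
    simp only [hm, hd, List.dropLast_cons_of_ne_nil hne, List.getLast?_cons,
      List.getLastD_eq_getLast?, hE, Option.getD_some] at IH ⊢
    split_ifs with hc
    · have hp : (v % 10 == 1 || v % 10 == 3 || v % 10 == 7 || v % 10 == 9) = false := by
        simp; omega
      simp [hp]
    · have hp : (v % 10 == 1 || v % 10 == 3 || v % 10 == 7 || v % 10 == 9) = true := by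
        simp; omega
      simp only [List.all_cons, hp, Bool.true_and]
      exact IH
  · rw [dif_neg h10]
    have h0 : v / 10 = 0 := by omega
    have hv10 : v % 10 = v := by omega
    rw [hm, hd, h0, hv10, pvDigits]
    simp
termination_by v.toNat
decreasing_by omega

-- ===== VERDICT (by name: the statement is the Claim_ definition above) =====
theorem check_digits_py_spec : Claim_equal_check_digits_py := by
  intro value _
  unfold Spec_check_digits_py check_digits_py check_digits_py_alt
  by_cases hlt : value < 10
  · -- A also returns false for every value < 10 (negatives, 0, single digits)
    rw [if_pos hlt]
    simp only
    split_ifs with hc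
    · rfl
    · -- the loop is entered with floordiv value 10 ≤ 0 and at once
      -- returns the final membership test, which fails
      have hdm := PySem.Int.floordiv_mul_add_mod value 10
      have hmb : 0 ≤ PySem.Int.mod value 10 ∧ PySem.Int.mod value 10 < 10 := by
        rw [PySem.Int.mod_eq_emod_of_pos (by omega)]; omega
      have hle : PySem.Int.floordiv value 10 ≤ 0 := by nlinarith [hdm, hmb.1, hmb.2]
      rw [check_digits_py_loop, dif_neg (show ¬ (10 ≤ PySem.Int.floordiv value 10) by omega)]
      simp; omega
  · rw [if_neg hlt]
    have hge : (10:Int) ≤ value := by omega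
    have hm : PySem.Int.mod value 10 = value % 10 := PySem.Int.mod_eq_emod_of_pos (by omega)
    have hd : PySem.Int.floordiv value 10 = value / 10 := PySem.Int.floordiv_eq_ediv_of_pos (by omega)
    have h1 : 1 ≤ value / 10 := by omega
    have hne := pvDigits_ne_nil (value / 10) (by omega)
    obtain ⟨x, hE⟩ : ∃ x, (pvDigits (value / 10)).getLast? = some x :=
      Option.isSome_iff_exists.mp (List.getLast?_isSome.mpr hne)
    have hdig : pvDigits value = value % 10 :: pvDigits (value / 10) := by
      rw [pvDigits, dif_pos (show (0:Int) < value by omega), hm, hd]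
    simp only [hdig, hm, hd]
    rw [slice_one_neg_one, pyGet?_neg_one _ (by simp), pyGet?_zero]
    simp only [List.getLast?_cons, List.getLastD_eq_getLast?, hE, Option.getD_some,
      List.tail_cons]
    split_ifs with hc
    · have hp : (value % 10 == 3 || value % 10 == 7) = false := by simp; omega
      simp [hp]
    · have hp : (value % 10 == 3 || value % 10 == 7) = true := by simp; omega
      simp only [hp, Bool.true_and]
      rw [loop_char (value / 10) h1, List.getLastD_eq_getLast?, hE, Option.getD_some]
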